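-- pv_equiv track=rewrite | github.com/katiarojas87/final-project | suumo_scraper.py | _build_ctx_maps
-- ===== SOURCE A (Python) =====
-- from typing import Dict, List, Optional, Set, Tuple
--
-- def _build_ctx_maps(
--     dom_cands:   List[Tuple[str, str]],
--     regex_cands: List[Tuple[str, str]],
-- ) -> Tuple[Dict[str, str], Dict[str, str]]:
--     def best_map(cands: List[Tuple[str, str]]) -> Dict[str, str]:
--         out: Dict[str, str] = {}
--         for u, ctx in cands:
--             if u not in out or len(ctx) > len(out[u]):
--                 out[u] = ctx
--         return out
--     return best_map(dom_cands), best_map(regex_cands)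
-- ===== SOURCE B (Python) =====
-- def _build_ctx_maps(dom_cands, regex_cands):
--     def best_map(cands):
--         out = {}
--         for u, _ in cands:
--             if u not in out:
--                 out[u] = max((c for v, c in cands if v == u), key=len)
--         return out
--     return best_map(dom_cands), best_map(regex_cands)
-- ===== Notes on version B (the rewrite author's own statement) =====
-- stated objective: alternative
-- what changed: A keeps a running best-so-far dict updated per pair; B instead, at each URL's first occurrence, computes max(contexts of that URL, key=len) by scanning the whole candidate list, so the running comparison state disappears.
import Mathlib
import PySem

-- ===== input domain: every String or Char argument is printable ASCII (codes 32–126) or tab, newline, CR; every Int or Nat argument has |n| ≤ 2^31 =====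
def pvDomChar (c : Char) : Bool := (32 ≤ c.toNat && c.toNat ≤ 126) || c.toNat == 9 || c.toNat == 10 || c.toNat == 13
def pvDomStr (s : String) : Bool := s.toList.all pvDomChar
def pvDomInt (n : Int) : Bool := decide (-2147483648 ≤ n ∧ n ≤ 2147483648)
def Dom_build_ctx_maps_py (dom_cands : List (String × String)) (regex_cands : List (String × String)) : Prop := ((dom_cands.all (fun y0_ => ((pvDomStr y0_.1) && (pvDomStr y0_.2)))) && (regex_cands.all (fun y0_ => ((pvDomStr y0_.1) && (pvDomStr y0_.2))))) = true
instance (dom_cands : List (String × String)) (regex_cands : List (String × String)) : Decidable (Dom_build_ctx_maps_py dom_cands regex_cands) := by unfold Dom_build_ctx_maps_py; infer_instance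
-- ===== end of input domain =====

-- B replaces A's running-best dict update with a per-key scan: for each first occurrence of a URL it
-- takes max(contexts of that URL, key=len) over the whole list (objective: alternative decomposition).


-- ===== PORT A =====
-- best_map: 'if u not in out or len(ctx) > len(out[u]): out[u] = ctx'
def pvBestMapA (cands : List (String × String)) : PySem.Dict String String :=
  cands.foldl (fun out p =>
    match out.get? p.1 with
    | none => out.insert p.1 p.2
    | some prev => if PySem.Str.len prev < PySem.Str.len p.2 then out.insert p.1 p.2 else out)
    PySem.Dict.empty

def build_ctx_maps_py (dom_cands : List (String × String)) (regex_cands : List (String × String)) : (List (String × String)) × (List (String × String)) :=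
  ((pvBestMapA dom_cands).items, (pvBestMapA regex_cands).items)

-- ===== PORT B =====
-- 'max((c for v, c in cands if v == u), key=len)'; the 'none' branch is only where Python's max
-- would raise on an empty iterable, which never happens (u comes from cands itself).
def pvLongestB (cands : List (String × String)) (u : String) : Option String :=
  PySem.List.max? ((cands.filter (fun q => q.1 == u)).map (·.2)) PySem.Str.len

-- best_map: 'if u not in out: out[u] = max(...)'
def pvBestMapB (cands : List (String × String)) : PySem.Dict String String :=
  cands.foldl (fun out p =>
    if out.contains p.1 then out
    else match pvLongestB cands p.1 with
      | some m => out.insert p.1 m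
      | none => out)
    PySem.Dict.empty

def build_ctx_maps_py_alt (dom_cands : List (String × String)) (regex_cands : List (String × String)) : (List (String × String)) × (List (String × String)) :=
  ((pvBestMapB dom_cands).items, (pvBestMapB regex_cands).items)

-- ===== PRECONDITION & SPEC =====
def Spec_build_ctx_maps_py (dom_cands : List (String × String)) (regex_cands : List (String × String)) (out : (List (String × String)) × (List (String × String))) : Prop := out = build_ctx_maps_py_alt dom_cands regex_cands
instance (dom_cands : List (String × String)) (regex_cands : List (String × String)) (out : (List (String × String)) × (List (String × String))) : Decidable (Spec_build_ctx_maps_py dom_cands regex_cands out) := by unfold Spec_build_ctx_maps_py; infer_instance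

-- ===== CLAIM (what is proved, stated in full; the proofs are below) =====
def Claim_equal_build_ctx_maps_py : Prop := ∀ (dom_cands : List (String × String)) (regex_cands : List (String × String)), Dom_build_ctx_maps_py dom_cands regex_cands → Spec_build_ctx_maps_py dom_cands regex_cands (build_ctx_maps_py dom_cands regex_cands)

-- ===== LEMMAS AND PROOFS =====

-- dropping a head the key is not equal to does not change an if-membership lookup
lemma pvIfConsMem {u v : String} {rest : List String} (h : u ≠ v) (X : Option String) :
    (if u ∈ rest then X else none) = (if u ∈ v :: rest then X else none) := by
  by_cases hm : u ∈ rest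
  · rw [if_pos hm, if_pos (List.mem_cons_of_mem _ hm)]
  · rw [if_neg hm, if_neg (by simp [List.mem_cons, h, hm])]

-- A's loop, seen through get?: the entry at u is the strict-running-max fold over u's contexts.
lemma pvA_get? (l : List (String × String)) (d : PySem.Dict String String) (u : String) :
    (l.foldl (fun out p =>
      match out.get? p.1 with
      | none => out.insert p.1 p.2
      | some prev => if PySem.Str.len prev < PySem.Str.len p.2 then out.insert p.1 p.2 else out)
      d).get? u
    = ((l.filter (fun p => p.1 == u)).map (·.2)).foldl
        (fun acc c => match acc with
          | none => some c
          | some m => if PySem.Str.len m < PySem.Str.len c then some c else some m)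
        (d.get? u) := by
  induction l generalizing d with
  | nil => rfl
  | cons p l ih =>
    simp only [List.foldl_cons, List.filter_cons]
    by_cases h : p.1 = u
    · subst h
      simp only [beq_self_eq_true, if_true, List.map_cons, List.foldl_cons]
      rw [ih]
      congr 1
      cases hd : d.get? p.1 with
      | none =>
        show (d.insert p.1 p.2).get? p.1 = some p.2
        rw [PySem.Dict.get?_insert_self]
      | some prev =>
        show (if PySem.Str.len prev < PySem.Str.len p.2 then d.insert p.1 p.2 else d).get? p.1
            = if PySem.Str.len prev < PySem.Str.len p.2 then some p.2 else some prev
        by_cases hlt : PySem.Str.len prev < PySem.Str.len p.2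
        · rw [if_pos hlt, if_pos hlt, PySem.Dict.get?_insert_self]
        · rw [if_neg hlt, if_neg hlt, hd]
    · have hb : (p.1 == u) = false := by simp [h]
      simp only [hb, Bool.false_eq_true, if_false]
      rw [ih]
      congr 1
      have hne : u ≠ p.1 := fun e => h e.symm
      cases hd : d.get? p.1 with
      | none => rw [PySem.Dict.get?_insert_of_ne _ _ hne]
      | some prev =>
        by_cases hlt : PySem.Str.len prev < PySem.Str.len p.2
        · simp only [if_pos hlt]; rw [PySem.Dict.get?_insert_of_ne _ _ hne]
        · simp only [if_neg hlt]

-- A's loop, seen through keys: first-occurrence order of the URLs.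
lemma pvA_keys (l : List (String × String)) (d : PySem.Dict String String) :
    (l.foldl (fun out p =>
      match out.get? p.1 with
      | none => out.insert p.1 p.2
      | some prev => if PySem.Str.len prev < PySem.Str.len p.2 then out.insert p.1 p.2 else out)
      d).keys = PySem.Set.update d.keys (l.map (·.1)) := by
  induction l generalizing d with
  | nil => rfl
  | cons p l ih =>
    simp only [List.foldl_cons, List.map_cons, PySem.Set.update_cons]
    rw [ih]
    congr 1
    cases hd : d.get? p.1 with
    | none =>
      have hc : d.contains p.1 = false := (PySem.Dict.get?_eq_none_iff_contains d p.1).mp hd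
      rw [PySem.Dict.keys_insert_of_not_contains d p.2 hc,
          PySem.Set.add_of_not_mem (fun hm => by
            rw [(PySem.Dict.contains_iff_mem_keys d p.1).mpr hm] at hc; cases hc)]
    | some prev =>
      have hc : d.contains p.1 = true := by
        by_contra hfalse
        rw [(PySem.Dict.get?_eq_none_iff_contains d p.1).mpr (Bool.eq_false_iff.mpr hfalse)] at hd
        cases hd
      have hm : p.1 ∈ d.keys := (PySem.Dict.contains_iff_mem_keys d p.1).mp hc
      by_cases hlt : PySem.Str.len prev < PySem.Str.len p.2
      · simp only [if_pos hlt]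
        rw [PySem.Dict.keys_insert_of_contains d p.2 hc, PySem.Set.add_of_mem hm]
      · simp only [if_neg hlt]
        rw [PySem.Set.add_of_mem hm]

-- B's loop, seen through get?: the first fresh occurrence of u installs pvLongestB cands u.
lemma pvB_get? (cands l : List (String × String)) (d : PySem.Dict String String) (u : String)
    (hl : ∀ p ∈ l, p ∈ cands) :
    (l.foldl (fun out p =>
      if out.contains p.1 then out
      else match pvLongestB cands p.1 with
        | some m => out.insert p.1 m
        | none => out) d).get? u
    = if d.contains u then d.get? u
      else if u ∈ l.map (·.1) then pvLongestB cands u else none := by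
  induction l generalizing d with
  | nil =>
    simp only [List.foldl_nil, List.map_nil, List.not_mem_nil, if_false]
    by_cases hc : d.contains u
    · rw [if_pos hc]
    · rw [if_neg hc, (PySem.Dict.get?_eq_none_iff_contains d u).mpr (Bool.eq_false_iff.mpr hc)]
  | cons p l ih =>
    have hl' : ∀ q ∈ l, q ∈ cands := fun q hq => hl q (List.mem_cons_of_mem p hq)
    have hp : p ∈ cands := hl p List.mem_cons_self
    simp only [List.foldl_cons, List.map_cons]
    by_cases hc : d.contains p.1
    · rw [if_pos hc, ih d hl']
      by_cases hu : d.contains u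
      · simp [hu]
      · have hne : u ≠ p.1 := fun e => hu (e ▸ hc)
        rw [if_neg hu, if_neg hu]
        exact pvIfConsMem hne _
    · rw [if_neg hc]
      obtain ⟨m, hm⟩ : ∃ m, pvLongestB cands p.1 = some m := by
        cases hLm : pvLongestB cands p.1 with
        | some m => exact ⟨m, rfl⟩
        | none =>
          exfalso
          have hempty := (PySem.List.max?_eq_none_iff _ _).mp hLm
          have : p.2 ∈ (cands.filter (fun q => q.1 == p.1)).map (·.2) :=
            List.mem_map_of_mem (List.mem_filter.mpr ⟨hp, by simp⟩)
          rw [hempty] at this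
          exact List.not_mem_nil this
      rw [hm, ih _ hl']
      by_cases hu : u = p.1
      · subst hu
        rw [if_pos (PySem.Dict.contains_insert_self d p.1 m), PySem.Dict.get?_insert_self,
            if_neg hc, if_pos List.mem_cons_self, hm]
      · have hci : (d.insert p.1 m).contains u = d.contains u := by
          rw [PySem.Dict.contains_insert]; simp [hu]
        rw [hci, PySem.Dict.get?_insert_of_ne _ _ hu]
        by_cases hdu : d.contains u
        · simp [hdu]
        · rw [if_neg hdu, if_neg hdu]
          exact pvIfConsMem hu _

-- B's loop, seen through keys: the same first-occurrence order.
lemma pvB_keys (cands l : List (String × String)) (d : PySem.Dict String String)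
    (hl : ∀ p ∈ l, p ∈ cands) :
    (l.foldl (fun out p =>
      if out.contains p.1 then out
      else match pvLongestB cands p.1 with
        | some m => out.insert p.1 m
        | none => out) d).keys = PySem.Set.update d.keys (l.map (·.1)) := by
  induction l generalizing d with
  | nil => rfl
  | cons p l ih =>
    have hl' : ∀ q ∈ l, q ∈ cands := fun q hq => hl q (List.mem_cons_of_mem p hq)
    have hp : p ∈ cands := hl p List.mem_cons_self
    simp only [List.foldl_cons, List.map_cons, PySem.Set.update_cons]
    by_cases hc : d.contains p.1
    · rw [if_pos hc, ih d hl',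
          PySem.Set.add_of_mem ((PySem.Dict.contains_iff_mem_keys d p.1).mp hc)]
    · rw [if_neg hc]
      obtain ⟨m, hm⟩ : ∃ m, pvLongestB cands p.1 = some m := by
        cases hLm : pvLongestB cands p.1 with
        | some m => exact ⟨m, rfl⟩
        | none =>
          exfalso
          have hempty := (PySem.List.max?_eq_none_iff _ _).mp hLm
          have : p.2 ∈ (cands.filter (fun q => q.1 == p.1)).map (·.2) :=
            List.mem_map_of_mem (List.mem_filter.mpr ⟨hp, by simp⟩)
          rw [hempty] at this
          exact List.not_mem_nil this
      rw [hm, ih _ hl', PySem.Dict.keys_insert_of_not_contains d m (Bool.eq_false_iff.mpr hc),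
          PySem.Set.add_of_not_mem (fun hmem => by
            rw [(PySem.Dict.contains_iff_mem_keys d p.1).mpr hmem] at hc; exact hc rfl)]

-- The two best_maps agree as item lists.
lemma pvBestMap_eq (cands : List (String × String)) :
    (pvBestMapA cands).items = (pvBestMapB cands).items := by
  have hkA : (pvBestMapA cands).keys = PySem.Set.ofList (cands.map (·.1)) := by
    unfold pvBestMapA
    rw [pvA_keys, PySem.Dict.keys_empty, PySem.Set.update_nil_left]
  have hkB : (pvBestMapB cands).keys = PySem.Set.ofList (cands.map (·.1)) := by
    unfold pvBestMapB
    rw [pvB_keys cands cands _ (fun p hp => hp), PySem.Dict.keys_empty, PySem.Set.update_nil_left]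
  have hndA : (pvBestMapA cands).keys.Nodup := by rw [hkA]; exact PySem.Set.nodup_ofList _
  have hndB : (pvBestMapB cands).keys.Nodup := by rw [hkB]; exact PySem.Set.nodup_ofList _
  rw [PySem.Dict.items_eq_map_keys _ hndA "", PySem.Dict.items_eq_map_keys _ hndB "", hkA, hkB]
  apply List.map_congr_left
  intro u hu
  have humem : u ∈ cands.map (·.1) := (PySem.Set.mem_ofList _ _).mp hu
  have hgA : (pvBestMapA cands).get? u = pvLongestB cands u := by
    unfold pvBestMapA
    rw [pvA_get?, PySem.Dict.get?_empty]
    simp only [pvLongestB, PySem.List.max?]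
    exact PySem.List.foldl_congr_mem _ _ _ _ (fun acc c _ => by cases acc <;> rfl)
  have hgB : (pvBestMapB cands).get? u = pvLongestB cands u := by
    unfold pvBestMapB
    rw [pvB_get? cands cands _ u (fun p hp => hp)]
    rw [if_neg (by rw [PySem.Dict.contains_empty]; exact Bool.false_ne_true), if_pos humem]
  rw [PySem.Dict.getD_eq_get?_getD, PySem.Dict.getD_eq_get?_getD, hgA, hgB]

-- ===== VERDICT (by name: the statement is the Claim_ definition above) =====
theorem build_ctx_maps_py_spec : Claim_equal_build_ctx_maps_py := by
  intro dom_cands regex_cands _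
  unfold Spec_build_ctx_maps_py build_ctx_maps_py build_ctx_maps_py_alt
  rw [pvBestMap_eq, pvBestMap_eq]
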